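-- pv_equiv track=rewrite | github.com/alfmunny/data-sheet-statistics | data_sheet_py/lib/writer.py | full_info_push
-- ===== SOURCE A (Python) =====
-- def full_info_push(counter, letters_info):
--     full_info = {}
--     for c in counter.keys():
--         full_info[c] = {}
--         full_info[c]['sum'] = counter[c]
--         for f in letters_info.keys():
--             for letter in letters_info[f].keys():
--                 if c == letter:
--                     full_info[c][f] = letters_info[f][letter]
--                     break
--     return full_info
-- ===== SOURCE B (Python) =====
-- def full_info_push(counter, letters_info):
--     # Build an inverted index letter -> {f: value} in one pass over letters_info,
--     # then merge it with counter in a single pass.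
--     index = {}
--     for f, fd in letters_info.items():
--         for letter, value in fd.items():
--             index.setdefault(letter, {})[f] = value
--     full_info = {}
--     for c, s in counter.items():
--         info = {'sum': s}
--         info.update(index.get(c, {}))
--         full_info[c] = info
--     return full_info
-- ===== Notes on version B (the rewrite author's own statement) =====
-- stated objective: faster
-- what changed: B replaces A's per-counter-key rescan of all of letters_info (and its inner per-letter scan with break) by a single pass that builds an inverted index letter -> {f: value}, then one merge pass over counter.
import Mathlib
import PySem

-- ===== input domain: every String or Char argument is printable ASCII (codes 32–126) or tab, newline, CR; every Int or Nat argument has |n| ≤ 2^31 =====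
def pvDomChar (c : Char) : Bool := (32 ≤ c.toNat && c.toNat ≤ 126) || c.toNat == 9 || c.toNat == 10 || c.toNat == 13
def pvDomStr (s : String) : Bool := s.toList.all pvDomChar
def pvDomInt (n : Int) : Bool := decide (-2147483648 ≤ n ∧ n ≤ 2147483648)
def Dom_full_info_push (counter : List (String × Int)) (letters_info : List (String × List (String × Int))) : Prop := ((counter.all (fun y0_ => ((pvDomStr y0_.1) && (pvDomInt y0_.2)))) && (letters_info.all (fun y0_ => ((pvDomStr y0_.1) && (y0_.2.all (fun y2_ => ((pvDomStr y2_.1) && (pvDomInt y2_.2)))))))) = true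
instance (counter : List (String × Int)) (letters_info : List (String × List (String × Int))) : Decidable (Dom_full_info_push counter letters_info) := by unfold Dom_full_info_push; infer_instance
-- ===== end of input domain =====

-- B replaces A's per-counter-key rescans of letters_info by one inverted-index pass plus one merge pass (objective: faster).
-- Both ports interpret the assoc-list arguments as Python dicts via PySem.Dict (last duplicate key wins, as dict() would build them).

-- ===== PORT A =====
-- inner `for letter in letters_info[f].keys(): if c == letter: full_info[c][f] = letters_info[f][letter]; break`
def fipInnerA (c f : String) (fd : PySem.Dict String Int) (info : PySem.Dict String Int) :
    List String → PySem.Dict String Int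
  | [] => info
  | letter :: rest =>
    if c == letter then info.insert f (fd.getD letter 0)
    else fipInnerA c f fd info rest

def full_info_push (counter : List (String × Int)) (letters_info : List (String × List (String × Int))) : List (String × List (String × Int)) :=
  let cd : PySem.Dict String Int := PySem.Dict.ofList counter
  let ld : PySem.Dict String (PySem.Dict String Int) :=
    PySem.Dict.ofList (letters_info.map (fun p => (p.1, PySem.Dict.ofList p.2)))
  -- `full_info[c] = {}` then mutations of `full_info[c]`: ported by building the inner dict and inserting it
  let full : PySem.Dict String (PySem.Dict String Int) :=
    cd.keys.foldl (fun full c =>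
      full.insert c
        (ld.keys.foldl (fun info f =>
            fipInnerA c f (ld.getD f PySem.Dict.empty) info (ld.getD f PySem.Dict.empty).keys)
          (PySem.Dict.empty.insert "sum" (cd.getD c 0))))
      PySem.Dict.empty
  full.items.map (fun p => (p.1, p.2.items))

-- ===== PORT B =====
def full_info_push_alt (counter : List (String × Int)) (letters_info : List (String × List (String × Int))) : List (String × List (String × Int)) :=
  let cd : PySem.Dict String Int := PySem.Dict.ofList counter
  let ld : PySem.Dict String (PySem.Dict String Int) :=
    PySem.Dict.ofList (letters_info.map (fun p => (p.1, PySem.Dict.ofList p.2)))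
  -- `index.setdefault(letter, {})[f] = value` (mutation of the shared inner dict): ported as getD + insert, exact
  let index : PySem.Dict String (PySem.Dict String Int) :=
    ld.items.foldl (fun idx p =>
      p.2.items.foldl (fun idx q =>
          idx.insert q.1 ((idx.getD q.1 PySem.Dict.empty).insert p.1 q.2)) idx)
      PySem.Dict.empty
  let full : PySem.Dict String (PySem.Dict String Int) :=
    cd.items.foldl (fun full p =>
      full.insert p.1
        ((PySem.Dict.empty.insert "sum" p.2).update (index.getD p.1 PySem.Dict.empty).items))
      PySem.Dict.empty
  full.items.map (fun p => (p.1, p.2.items))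

-- ===== PRECONDITION & SPEC =====
def Spec_full_info_push (counter : List (String × Int)) (letters_info : List (String × List (String × Int))) (out : List (String × List (String × Int))) : Prop := out = full_info_push_alt counter letters_info
instance (counter : List (String × Int)) (letters_info : List (String × List (String × Int))) (out : List (String × List (String × Int))) : Decidable (Spec_full_info_push counter letters_info out) := by unfold Spec_full_info_push; infer_instance

-- ===== CLAIM (what is proved, stated in full; the proofs are below) =====
def Claim_equal_full_info_push : Prop := ∀ (counter : List (String × Int)) (letters_info : List (String × List (String × Int))), Dom_full_info_push counter letters_info → Spec_full_info_push counter letters_info (full_info_push counter letters_info)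

-- ===== LEMMAS AND PROOFS =====

-- folding over a dict's keys, reading each value back with getD, is folding over its items
theorem fip_bridge {ν β : Type} (d : PySem.Dict String ν) (hn : d.keys.Nodup)
    (g : β → String → ν → β) (dflt : ν) (init : β) :
    d.keys.foldl (fun acc k => g acc k (d.getD k dflt)) init
      = d.items.foldl (fun acc p => g acc p.1 p.2) init := by
  obtain ⟨l⟩ := d
  induction l generalizing init with
  | nil => rfl
  | cons p rest ih =>
    obtain ⟨k0, v0⟩ := p
    have hk : (PySem.Dict.mk ((k0, v0) :: rest)).keys = k0 :: (PySem.Dict.mk rest).keys := rfl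
    rw [hk] at hn ⊢
    have hne : ∀ k ∈ (PySem.Dict.mk rest).keys, k ≠ k0 := by
      intro k hkm
      exact fun h => (List.nodup_cons.mp hn).1 (h ▸ hkm)
    have hget : (PySem.Dict.mk ((k0, v0) :: rest)).getD k0 dflt = v0 := by
      simp [PySem.Dict.getD_eq_get?_getD, PySem.Dict.get?_mk_cons]
    simp only [List.foldl_cons, hget]
    rw [PySem.List.foldl_congr_mem _ _
        (fun acc k => g acc k ((PySem.Dict.mk rest).getD k dflt)) _
        (fun acc k hkm => by
          have : (PySem.Dict.mk ((k0, v0) :: rest)).getD k dflt = (PySem.Dict.mk rest).getD k dflt := by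
            have hb : (k0 == k) = false := by
              simp only [beq_eq_false_iff_ne, ne_eq]
              exact fun h => hne k hkm h.symm
            simp [PySem.Dict.getD_eq_get?_getD, PySem.Dict.get?_mk_cons, hb]
          rw [this])]
    exact ih _ (List.nodup_cons.mp hn).2

-- A's break-loop over the letter keys is a conditional single insert
theorem fipInnerA_eq (c f : String) (fd : PySem.Dict String Int) (info : PySem.Dict String Int)
    (letters : List String) :
    fipInnerA c f fd info letters
      = if c ∈ letters then info.insert f (fd.getD c 0) else info := by
  induction letters with
  | nil => simp [fipInnerA]
  | cons letter rest ih =>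
    by_cases h : c = letter
    · subst h; simp [fipInnerA]
    · have hb : (c == letter) = false := by simp [h]
      simp [fipInnerA, hb, h, List.mem_cons, ih]

-- a fold inserting only keys different from c leaves getD c unchanged
theorem fip_getD_untouched {α : Type} (c : String) (qs : List α) (key : α → String)
    (h : ∀ q ∈ qs, key q ≠ c)
    (F : PySem.Dict String (PySem.Dict String Int) → α → PySem.Dict String Int)
    (idx : PySem.Dict String (PySem.Dict String Int)) :
    (qs.foldl (fun idx q => idx.insert (key q) (F idx q)) idx).getD c PySem.Dict.empty
      = idx.getD c PySem.Dict.empty := by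
  induction qs generalizing idx with
  | nil => rfl
  | cons q rest ih =>
    simp only [List.foldl_cons]
    rw [ih (fun r hr => h r (List.mem_cons_of_mem _ hr))]
    exact PySem.Dict.getD_insert_of_ne _ _ _ (fun he => h q (List.mem_cons_self ..) he.symm)

-- one letters_info[f] pass of B's index build, viewed at key c
theorem fip_index_inner (c f : String) (fd : PySem.Dict String Int) (hn : fd.keys.Nodup)
    (idx : PySem.Dict String (PySem.Dict String Int)) :
    (fd.items.foldl (fun idx q =>
        idx.insert q.1 ((idx.getD q.1 PySem.Dict.empty).insert f q.2)) idx).getD c PySem.Dict.empty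
      = match fd.get? c with
        | some v => (idx.getD c PySem.Dict.empty).insert f v
        | none => idx.getD c PySem.Dict.empty := by
  obtain ⟨qs⟩ := fd
  revert hn
  induction qs generalizing idx with
  | nil => intro _; rfl
  | cons q rest ih =>
    intro hn
    obtain ⟨l, v⟩ := q
    have hn' := List.nodup_cons.mp hn
    by_cases h : l = c
    · subst h
      have hne : ∀ q ∈ rest, q.1 ≠ l := by
        intro q hq he
        have hm : q.1 ∈ rest.map (fun x => x.1) := List.mem_map_of_mem hq
        rw [he] at hm
        exact hn'.1 hm
      simp only [List.foldl_cons]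
      rw [fip_getD_untouched l rest (fun q => q.1) hne
            (fun idx q => (idx.getD q.1 PySem.Dict.empty).insert f q.2)]
      rw [PySem.Dict.getD_insert_self]
      simp [PySem.Dict.get?_mk_cons]
    · have hb : (l == c) = false := by
        simp only [beq_eq_false_iff_ne, ne_eq]; exact h
      simp only [List.foldl_cons]
      rw [ih _ hn'.2]
      rw [PySem.Dict.getD_insert_of_ne _ _ _ (fun he => h he.symm)]
      simp [PySem.Dict.get?_mk_cons, hb]

-- the whole index build, viewed at key c
theorem fip_index (c : String) (items : List (String × PySem.Dict String Int))
    (hv : ∀ p ∈ items, p.2.keys.Nodup)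
    (idx : PySem.Dict String (PySem.Dict String Int)) :
    (items.foldl (fun idx p =>
        p.2.items.foldl (fun idx q =>
            idx.insert q.1 ((idx.getD q.1 PySem.Dict.empty).insert p.1 q.2)) idx) idx).getD c PySem.Dict.empty
      = items.foldl (fun d p =>
          match p.2.get? c with
          | some v => d.insert p.1 v
          | none => d) (idx.getD c PySem.Dict.empty) := by
  revert hv
  induction items generalizing idx with
  | nil => intro _; rfl
  | cons p rest ih =>
    intro hv
    simp only [List.foldl_cons]
    rw [ih _ (fun r hr => hv r (List.mem_cons_of_mem _ hr))]
    rw [fip_index_inner c p.1 p.2 (hv p (List.mem_cons_self ..)) idx]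

-- the per-c slice of the index lists its entries in build order
theorem fip_items_of_fold (c : String) (items : List (String × PySem.Dict String Int))
    (hn : (items.map (fun x => x.1)).Nodup) (acc : PySem.Dict String Int)
    (hfresh : ∀ p ∈ items, acc.contains p.1 = false) :
    (items.foldl (fun d p =>
        match p.2.get? c with
        | some v => d.insert p.1 v
        | none => d) acc).items
      = acc.items ++ items.filterMap (fun p => (p.2.get? c).map (fun v => (p.1, v))) := by
  revert hn hfresh
  induction items generalizing acc with
  | nil => intro _ _; simp
  | cons p rest ih =>
    intro hn hfresh
    have hn' := List.nodup_cons.mp hn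
    simp only [List.foldl_cons, List.filterMap_cons]
    cases hg : p.2.get? c with
    | none =>
      exact ih acc hn'.2 (fun q hq => hfresh q (List.mem_cons_of_mem _ hq))
    | some v =>
      simp only [Option.map_some]
      rw [ih (acc.insert p.1 v) hn'.2 (fun q hq => by
        rw [PySem.Dict.contains_insert]
        have hb : (q.1 == p.1) = false := by
          simp only [beq_eq_false_iff_ne, ne_eq]
          intro he
          have hm : q.1 ∈ rest.map (fun x => x.1) := List.mem_map_of_mem hq
          rw [he] at hm
          exact hn'.1 hm
        simp [hb, hfresh q (List.mem_cons_of_mem _ hq)])]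
      rw [PySem.Dict.items_insert_of_not_contains _ _ (hfresh p (List.mem_cons_self ..))]
      simp

-- updating with that slice is the same selective fold started from d0
theorem fip_update_filterMap (c : String) (items : List (String × PySem.Dict String Int))
    (d0 : PySem.Dict String Int) :
    d0.update (items.filterMap (fun p => (p.2.get? c).map (fun v => (p.1, v))))
      = items.foldl (fun d p =>
          match p.2.get? c with
          | some v => d.insert p.1 v
          | none => d) d0 := by
  induction items generalizing d0 with
  | nil => rfl
  | cons p rest ih =>
    simp only [List.filterMap_cons]
    cases hg : p.2.get? c with
    | none => simp only [hg, List.foldl_cons]; exact ih d0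
    | some v =>
      simp only [hg, Option.map_some, List.foldl_cons]
      exact ih (d0.insert p.1 v)

-- every value reachable in d.update l comes from d or from l
theorem fip_mem_values_update {ν : Type} (l : List (String × ν)) (d : PySem.Dict String ν)
    (w : ν) (hw : w ∈ (d.update l).values) : w ∈ d.values ∨ w ∈ l.map (fun p => p.2) := by
  induction l generalizing d with
  | nil => exact Or.inl hw
  | cons p rest ih =>
    have hw' : w ∈ ((d.insert p.1 p.2).update rest).values := by
      simpa [PySem.Dict.update] using hw
    rcases ih (d.insert p.1 p.2) hw' with h | h
    · rcases PySem.Dict.mem_values_insert d p.1 p.2 w h with h | h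
      · exact Or.inr (by simp [h])
      · exact Or.inl h
    · exact Or.inr (by simp; right; simpa using h)

-- values of the ported letters_info dict all have nodup keys
theorem fip_values_nodup (letters_info : List (String × List (String × Int)))
    (w : PySem.Dict String Int)
    (hw : w ∈ (PySem.Dict.ofList (letters_info.map (fun p => (p.1, PySem.Dict.ofList p.2)))).values) :
    w.keys.Nodup := by
  rcases fip_mem_values_update _ _ w (by simpa [PySem.Dict.ofList] using hw) with h | h
  · simp [PySem.Dict.values, PySem.Dict.empty] at h
  · rw [List.map_map] at h
    rcases List.mem_map.mp h with ⟨p, _, hp⟩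
    rw [← hp]
    exact PySem.Dict.nodup_keys_ofList p.2

-- the per-counter-key inner dicts of A and B agree
theorem fip_inner_eq (c : String) (s : Int)
    (ld : PySem.Dict String (PySem.Dict String Int)) (hn : ld.keys.Nodup)
    (hv : ∀ p ∈ ld.items, p.2.keys.Nodup) :
    ld.keys.foldl (fun info f =>
        fipInnerA c f (ld.getD f PySem.Dict.empty) info (ld.getD f PySem.Dict.empty).keys)
      (PySem.Dict.empty.insert "sum" s)
      = (PySem.Dict.empty.insert "sum" s).update
          ((ld.items.foldl (fun idx p =>
              p.2.items.foldl (fun idx q =>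
                  idx.insert q.1 ((idx.getD q.1 PySem.Dict.empty).insert p.1 q.2)) idx)
            PySem.Dict.empty).getD c PySem.Dict.empty).items := by
  have h1 : ld.keys.foldl (fun info f =>
        fipInnerA c f (ld.getD f PySem.Dict.empty) info (ld.getD f PySem.Dict.empty).keys)
      (PySem.Dict.empty.insert "sum" s)
      = ld.keys.foldl (fun info f =>
          match (ld.getD f PySem.Dict.empty).get? c with
          | some v => info.insert f v
          | none => info) (PySem.Dict.empty.insert "sum" s) := by
    apply PySem.List.foldl_congr_mem
    intro acc f _
    rw [fipInnerA_eq]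
    cases hg : (ld.getD f PySem.Dict.empty).get? c with
    | none =>
      have hc : c ∉ (ld.getD f PySem.Dict.empty).keys :=
        (PySem.Dict.get?_eq_none_iff_not_mem_keys _ _).mp hg
      simp [hc]
    | some v =>
      have hc : c ∈ (ld.getD f PySem.Dict.empty).keys := by
        by_contra hc
        rw [(PySem.Dict.get?_eq_none_iff_not_mem_keys _ _).mpr hc] at hg
        simp at hg
      rw [PySem.Dict.getD_of_get?_eq_some _ _ hg] at *
      simp [hc]
  rw [h1]
  rw [fip_bridge ld hn
      (fun acc f fd => match fd.get? c with | some v => acc.insert f v | none => acc)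
      PySem.Dict.empty (PySem.Dict.empty.insert "sum" s)]
  rw [fip_index c ld.items hv PySem.Dict.empty]
  rw [show (PySem.Dict.empty : PySem.Dict String (PySem.Dict String Int)).getD c PySem.Dict.empty
        = PySem.Dict.empty from rfl]
  rw [fip_items_of_fold c ld.items hn PySem.Dict.empty (fun p _ => PySem.Dict.contains_empty p.1)]
  rw [show (PySem.Dict.empty : PySem.Dict String Int).items = [] from rfl]
  rw [List.nil_append]
  rw [fip_update_filterMap]

-- ===== VERDICT (by name: the statement is the Claim_ definition above) =====
theorem full_info_push_spec : Claim_equal_full_info_push := by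
  intro counter letters_info _
  show full_info_push counter letters_info = full_info_push_alt counter letters_info
  simp only [full_info_push, full_info_push_alt]
  have hcd := PySem.Dict.nodup_keys_ofList counter
  have hld := PySem.Dict.nodup_keys_ofList (letters_info.map (fun p => (p.1, PySem.Dict.ofList p.2)))
  have hv : ∀ p ∈ (PySem.Dict.ofList (letters_info.map (fun p => (p.1, PySem.Dict.ofList p.2)))).items,
      p.2.keys.Nodup := by
    intro p hp
    exact fip_values_nodup letters_info p.2 (List.mem_map_of_mem hp)
  rw [fip_bridge (PySem.Dict.ofList counter) hcd
      (fun acc c s => acc.insert c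
        ((PySem.Dict.ofList (letters_info.map (fun p => (p.1, PySem.Dict.ofList p.2)))).keys.foldl
          (fun info f =>
            fipInnerA c f
              ((PySem.Dict.ofList (letters_info.map (fun p => (p.1, PySem.Dict.ofList p.2)))).getD f PySem.Dict.empty)
              info
              ((PySem.Dict.ofList (letters_info.map (fun p => (p.1, PySem.Dict.ofList p.2)))).getD f PySem.Dict.empty).keys)
          (PySem.Dict.empty.insert "sum" s)))
      0 PySem.Dict.empty]
  congr 1
  congr 1
  apply PySem.List.foldl_congr_mem
  intro acc p _
  rw [fip_inner_eq p.1 p.2 _ hld hv]
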